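-- pv_equiv track=rewrite | github.com/kikevgtz4/Micalli | backend/messaging/serializers.py | _determine_flag_reason
-- ===== SOURCE A (Python) =====
-- def _determine_flag_reason(violations):
--     """Determine appropriate flag reason based on violations"""
--     violation_types = [v['type'] for v in violations]
--
--     if 'payment_circumvention' in violation_types:
--         return 'payment_circumvention'
--     elif any(t in violation_types for t in ['phone_number', 'email', 'messaging_app']):
--         return 'contact_info'
--     else:
--         return 'other'
-- ===== SOURCE B (Python) =====
-- def _determine_flag_reason(violations):
--     """Determine appropriate flag reason based on violations (single pass)"""
--     has_contact = False
--     for v in violations: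
--         t = v['type']
--         if t == 'payment_circumvention':
--             return 'payment_circumvention'
--         if t in ('phone_number', 'email', 'messaging_app'):
--             has_contact = True
--     return 'contact_info' if has_contact else 'other'
-- ===== Notes on version B (the rewrite author's own statement) =====
-- stated objective: simpler
-- what changed: Replaces build-a-list-then-scan-it-twice with a single early-returning loop over violations that keeps one has_contact flag.
import Mathlib
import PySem

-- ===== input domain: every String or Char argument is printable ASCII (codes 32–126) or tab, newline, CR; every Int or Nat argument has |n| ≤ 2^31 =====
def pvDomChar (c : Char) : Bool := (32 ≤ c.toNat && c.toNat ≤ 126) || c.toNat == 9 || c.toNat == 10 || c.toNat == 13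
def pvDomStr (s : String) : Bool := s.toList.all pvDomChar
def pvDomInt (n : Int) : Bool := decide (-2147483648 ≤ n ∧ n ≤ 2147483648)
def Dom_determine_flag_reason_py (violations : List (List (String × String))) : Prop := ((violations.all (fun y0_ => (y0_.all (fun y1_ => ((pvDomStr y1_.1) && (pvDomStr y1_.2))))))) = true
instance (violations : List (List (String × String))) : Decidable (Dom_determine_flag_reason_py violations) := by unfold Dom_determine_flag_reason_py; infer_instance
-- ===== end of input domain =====

-- B fuses A's build-list-then-two-scans into one early-returning pass with a has_contact flag; return value only.

-- ===== PORT A =====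
-- v['type'] (dict lookup, first match); Pre_ guarantees the key is present.
def pvType (v : List (String × String)) : String :=
  ((PySem.Dict.mk v).get? "type").getD ""

def determine_flag_reason_py (violations : List (List (String × String))) : String :=
  let violation_types := violations.map pvType
  if violation_types.contains "payment_circumvention" then
    "payment_circumvention"
  else if ["phone_number", "email", "messaging_app"].any (fun t => violation_types.contains t) then
    "contact_info"
  else
    "other"

-- ===== PORT B =====
def pvAltLoop (violations : List (List (String × String))) (has_contact : Bool) : String :=
  match violations with
  | [] => if has_contact then "contact_info" else "other"
  | v :: rest =>
      let t := pvType v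
      if t = "payment_circumvention" then "payment_circumvention"
      else pvAltLoop rest (has_contact || ["phone_number", "email", "messaging_app"].contains t)

def determine_flag_reason_py_alt (violations : List (List (String × String))) : String :=
  pvAltLoop violations false

-- ===== PRECONDITION & SPEC =====
-- Pre_ excludes violations lacking a 'type' key, on which both Pythons raise KeyError.
def Pre_determine_flag_reason_py (violations : List (List (String × String))) : Prop :=
  ∀ v ∈ violations, ((PySem.Dict.mk v).get? "type").isSome
instance (violations : List (List (String × String))) : Decidable (Pre_determine_flag_reason_py violations) := by unfold Pre_determine_flag_reason_py; infer_instance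
def pvWitness_determine_flag_reason_py : (List (List (String × String))) := [[("type", "email")], [("type", "other")]]

def Spec_determine_flag_reason_py (violations : List (List (String × String))) (out : String) : Prop := out = determine_flag_reason_py_alt violations
instance (violations : List (List (String × String))) (out : String) : Decidable (Spec_determine_flag_reason_py violations out) := by unfold Spec_determine_flag_reason_py; infer_instance

-- ===== CLAIM (what is proved, stated in full; the proofs are below) =====
def Claim_equal_determine_flag_reason_py : Prop := ∀ (violations : List (List (String × String))), Dom_determine_flag_reason_py violations → Pre_determine_flag_reason_py violations → Spec_determine_flag_reason_py violations (determine_flag_reason_py violations)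

-- ===== LEMMAS AND PROOFS =====

-- Characterisation of B's loop in terms of the two scans A performs.
theorem pvAltLoop_eq (violations : List (List (String × String))) (hc : Bool) :
    pvAltLoop violations hc =
      (let ts := violations.map pvType
       if ts.contains "payment_circumvention" then "payment_circumvention"
       else if hc || ts.any (fun t => ["phone_number", "email", "messaging_app"].contains t) then "contact_info"
       else "other") := by
  induction violations generalizing hc with
  | nil => simp [pvAltLoop]
  | cons v rest ih =>
      simp only [pvAltLoop, List.map_cons, List.contains_cons, List.any_cons]
      by_cases h : pvType v = "payment_circumvention"
      · simp [h]
      · rw [ih]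
        simp only [h, if_false]
        have : ("payment_circumvention" == pvType v) = false := by
          simp; exact fun he => h he.symm
        simp only [this, Bool.false_or]
        congr 1
        by_cases hp : (rest.map pvType).contains "payment_circumvention" <;> simp [Bool.or_assoc, Bool.or_comm, Bool.or_left_comm]

-- The two membership scans commute: any t in S with t ∈ ts  ↔  any t in ts with t ∈ S.
theorem any_contains_comm (S ts : List String) :
    S.any (fun t => ts.contains t) = ts.any (fun t => S.contains t) := by
  rw [Bool.eq_iff_iff]
  simp only [List.any_eq_true, List.contains_iff_mem]
  constructor
  · rintro ⟨t, h1, h2⟩; exact ⟨t, h2, h1⟩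
  · rintro ⟨t, h1, h2⟩; exact ⟨t, h2, h1⟩

-- ===== VERDICT (by name: the statement is the Claim_ definition above) =====
theorem determine_flag_reason_py_spec : Claim_equal_determine_flag_reason_py := by
  intro violations _ _
  unfold Spec_determine_flag_reason_py determine_flag_reason_py determine_flag_reason_py_alt
  rw [pvAltLoop_eq]
  simp only [Bool.false_or]
  rw [any_contains_comm]
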